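-- pv_equiv track=rewrite | github.com/manuabhijit/competitive-programming-practice | array/insertion-sort.py | getSortedWindow
-- ===== SOURCE A (Python) =====
-- def getSortedWindow(arrOld, new, delete):
--     if new == delete:
--         return arrOld
--     arr = []
--     isRemoved = False
--     isAdded = False
--     for e in arrOld:
--         if new < e and isAdded is False:
--             isAdded = True
--             arr.append(new)
--
--         if e == delete and isRemoved is False:
--             isRemoved = True
--         else:
--             arr.append(e)
--     if isAdded is False:
--         isAdded = True
--         arr.append(new)
--     return arr
-- ===== SOURCE B (Python) =====
-- def getSortedWindow(arrOld, new, delete):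
--     if new == delete:
--         return arrOld
--     i = next((k for k, e in enumerate(arrOld) if new < e), len(arrOld))
--     arr = arrOld[:i] + [new] + arrOld[i:]
--     if delete in arr:
--         arr.remove(delete)
--     return arr
-- ===== Notes on version B (the rewrite author's own statement) =====
-- stated objective: simpler
-- what changed: Replaced the single interleaved scan with two boolean flags by two independent steps: find the insertion index and splice new in, then drop the first occurrence of delete with list.remove guarded by a membership test.
import Mathlib
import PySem

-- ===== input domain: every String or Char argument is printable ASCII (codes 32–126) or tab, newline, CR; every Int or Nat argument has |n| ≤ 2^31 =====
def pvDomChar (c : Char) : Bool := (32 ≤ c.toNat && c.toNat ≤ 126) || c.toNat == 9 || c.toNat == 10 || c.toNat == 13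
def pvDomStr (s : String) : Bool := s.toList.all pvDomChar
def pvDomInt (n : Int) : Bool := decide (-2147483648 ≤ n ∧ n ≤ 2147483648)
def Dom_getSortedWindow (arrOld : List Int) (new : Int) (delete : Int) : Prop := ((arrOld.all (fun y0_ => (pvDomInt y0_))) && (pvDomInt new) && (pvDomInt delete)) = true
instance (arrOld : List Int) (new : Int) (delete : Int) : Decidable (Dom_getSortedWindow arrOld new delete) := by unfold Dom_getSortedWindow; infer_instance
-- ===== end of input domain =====

-- B replaces A's single interleaved flag-driven scan by two independent steps (find the
-- insertion index and splice, then drop the first occurrence of `delete`); objective: simpler.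

-- ===== PORT A =====
-- one iteration of A's for-loop; state = (arr, isRemoved, isAdded)
def pvStepA (new delete : Int) (s : List Int × Bool × Bool) (e : Int) : List Int × Bool × Bool :=
  let arr := s.1
  let isRemoved := s.2.1
  let isAdded := s.2.2
  let p : List Int × Bool := if new < e ∧ isAdded = false then (arr ++ [new], true) else (arr, isAdded)
  if e = delete ∧ isRemoved = false then (p.1, true, p.2)
  else (p.1 ++ [e], isRemoved, p.2)

def getSortedWindow (arrOld : List Int) (new : Int) (delete : Int) : List Int :=
  if new = delete then arrOld
  else
    let s := arrOld.foldl (pvStepA new delete) ([], false, false)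
    if s.2.2 = false then s.1 ++ [new] else s.1

-- ===== PORT B =====
def getSortedWindow_alt (arrOld : List Int) (new : Int) (delete : Int) : List Int :=
  if new = delete then arrOld
  else
    let i := arrOld.findIdx (fun e => new < e)          -- first index with new < e, else len
    let arr := arrOld.take i ++ new :: arrOld.drop i    -- arrOld[:i] + [new] + arrOld[i:]
    if arr.contains delete then arr.erase delete else arr  -- if delete in arr: arr.remove(delete)

-- ===== PRECONDITION & SPEC =====
def Spec_getSortedWindow (arrOld : List Int) (new : Int) (delete : Int) (out : List Int) : Prop := out = getSortedWindow_alt arrOld new delete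
instance (arrOld : List Int) (new : Int) (delete : Int) (out : List Int) : Decidable (Spec_getSortedWindow arrOld new delete out) := by unfold Spec_getSortedWindow; infer_instance

-- ===== CLAIM (what is proved, stated in full; the proofs are below) =====
def Claim_equal_getSortedWindow : Prop := ∀ (arrOld : List Int) (new : Int) (delete : Int), Dom_getSortedWindow arrOld new delete → Spec_getSortedWindow arrOld new delete (getSortedWindow arrOld new delete)

-- ===== LEMMAS AND PROOFS =====

-- the "run" of A's loop from a given state, including the trailing isAdded check
def pvRunA (new delete : Int) (l : List Int) (s : List Int × Bool × Bool) : List Int :=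
  let s' := l.foldl (pvStepA new delete) s
  if s'.2.2 = false then s'.1 ++ [new] else s'.1

theorem pvRunA_tt (new delete : Int) (l : List Int) :
    ∀ acc, pvRunA new delete l (acc, true, true) = acc ++ l := by
  induction l with
  | nil => intro acc; simp [pvRunA]
  | cons e t ih =>
    intro acc
    simp only [pvRunA, List.foldl_cons] at *
    have : pvStepA new delete (acc, true, true) e = (acc ++ [e], true, true) := by
      simp [pvStepA]
    rw [this, ih]
    simp

theorem pvRunA_ft (new delete : Int) (l : List Int) :
    ∀ acc, pvRunA new delete l (acc, false, true) = acc ++ l.erase delete := by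
  induction l with
  | nil => intro acc; simp [pvRunA]
  | cons e t ih =>
    intro acc
    by_cases hd : e = delete
    · have : pvStepA new delete (acc, false, true) e = (acc, true, true) := by
        simp [pvStepA, hd]
      simp only [pvRunA, List.foldl_cons, this]
      have := pvRunA_tt new delete t acc
      simp only [pvRunA] at this
      rw [this, List.erase_cons, if_pos (by simp [hd])]
    · have : pvStepA new delete (acc, false, true) e = (acc ++ [e], false, true) := by
        simp [pvStepA, hd]
      simp only [pvRunA, List.foldl_cons, this]
      have := ih (acc ++ [e])
      simp only [pvRunA] at this
      rw [this, List.erase_cons, if_neg (by simp [hd])]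
      simp

theorem pvRunA_tf (new delete : Int) (l : List Int) :
    ∀ acc, pvRunA new delete l (acc, true, false) =
      acc ++ l.take (l.findIdx (fun e => new < e)) ++ new :: l.drop (l.findIdx (fun e => new < e)) := by
  induction l with
  | nil => intro acc; simp [pvRunA]
  | cons e t ih =>
    intro acc
    by_cases hp : new < e
    · have : pvStepA new delete (acc, true, false) e = (acc ++ [new] ++ [e], true, true) := by
        simp [pvStepA, hp]
      simp only [pvRunA, List.foldl_cons, this]
      have := pvRunA_tt new delete t (acc ++ [new] ++ [e])
      simp only [pvRunA] at this
      rw [this]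
      simp [List.findIdx_cons, hp]
    · have : pvStepA new delete (acc, true, false) e = (acc ++ [e], true, false) := by
        simp [pvStepA, hp]
      simp only [pvRunA, List.foldl_cons, this]
      have := ih (acc ++ [e])
      simp only [pvRunA] at this
      rw [this]
      simp [List.findIdx_cons, hp]

theorem pvRunA_ff (new delete : Int) (hnd : new ≠ delete) (l : List Int) :
    ∀ acc, pvRunA new delete l (acc, false, false) =
      acc ++ (l.take (l.findIdx (fun e => new < e)) ++ new :: l.drop (l.findIdx (fun e => new < e))).erase delete := by
  induction l with
  | nil =>
    intro acc
    simp [pvRunA, hnd]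
  | cons e t ih =>
    intro acc
    by_cases hp : new < e
    · by_cases hd : e = delete
      · rw [hd] at hp ⊢
        have : pvStepA new delete (acc, false, false) delete = (acc ++ [new], true, true) := by
          simp [pvStepA, hp]
        simp only [pvRunA, List.foldl_cons, this]
        have := pvRunA_tt new delete t (acc ++ [new])
        simp only [pvRunA] at this
        rw [this]
        simp [List.findIdx_cons, hp, List.erase_cons, hnd, hd]
      · have : pvStepA new delete (acc, false, false) e = (acc ++ [new] ++ [e], false, true) := by
          simp [pvStepA, hp, hd]
        simp only [pvRunA, List.foldl_cons, this]
        have := pvRunA_ft new delete t (acc ++ [new] ++ [e])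
        simp only [pvRunA] at this
        rw [this]
        simp [List.findIdx_cons, hp, List.erase_cons, hnd, hd]
    · by_cases hd : e = delete
      · rw [hd] at hp ⊢
        have : pvStepA new delete (acc, false, false) delete = (acc, true, false) := by
          simp [pvStepA, hp]
        simp only [pvRunA, List.foldl_cons, this]
        have := pvRunA_tf new delete t acc
        simp only [pvRunA] at this
        rw [this]
        simp [List.findIdx_cons, hp, List.erase_cons, hd]
      · have : pvStepA new delete (acc, false, false) e = (acc ++ [e], false, false) := by
          simp [pvStepA, hp, hd]
        simp only [pvRunA, List.foldl_cons, this]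
        have := ih (acc ++ [e])
        simp only [pvRunA] at this
        rw [this]
        simp [List.findIdx_cons, hp, List.erase_cons, hd]

-- ===== VERDICT (by name: the statement is the Claim_ definition above) =====
theorem getSortedWindow_spec : Claim_equal_getSortedWindow := by
  intro arrOld new delete _
  unfold Spec_getSortedWindow getSortedWindow getSortedWindow_alt
  by_cases h : new = delete
  · simp [h]
  · simp only [if_neg h]
    have hA := pvRunA_ff new delete h arrOld []
    simp only [pvRunA, List.nil_append] at hA
    rw [hA]
    by_cases hc : (arrOld.take (arrOld.findIdx (fun e => new < e)) ++
        new :: arrOld.drop (arrOld.findIdx (fun e => new < e))).contains delete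
    · simp [hc]
    · simp only [hc, Bool.false_eq_true, if_neg, not_false_eq_true]
      rw [List.erase_of_not_mem]
      simpa using hc
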